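-- pv_equiv track=rewrite | github.com/ykdy3951/codetree-TILs | 241218/밭의 높이를 고르게하기/equalizing-the-height-of-the-field.py | min_cost_to_make_uniform
-- ===== SOURCE A (Python) =====
-- def min_cost_to_make_uniform(N, H, T, heights):
--     min_cost = float('inf')
--
--     for i in range(N - T + 1):
--         current_cost = 0
--         for j in range(i, i + T):
--             current_cost += abs(heights[j] - H)
--         min_cost = min(min_cost, current_cost)
--
--     return min_cost
-- ===== SOURCE B (Python) =====
-- def min_cost_to_make_uniform(N, H, T, heights):
--     # sliding window over a precomputed cost array: each window cost is derived
--     # from the previous one instead of being re-summed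
--     if T > N:
--         return float('inf')  # no window fits: the minimum over an empty set of windows
--     if T <= 0:
--         return 0  # a window of non-positive size covers nothing, so it costs nothing
--     costs = [abs(h - H) for h in heights[:N]]
--     window = sum(costs[:T])
--     best = window
--     for i in range(T, N):
--         window += costs[i] - costs[i - T]
--         if window < best:
--             best = window
--     return best
-- ===== Notes on version B (the rewrite author's own statement) =====
-- stated objective: alternative
-- what changed: Replaces the nested re-summation of each size-T window by a single sliding-window pass over a precomputed cost array that updates the window cost incrementally (add the entering element, drop the leaving one).
-- outside the precondition, e.g. on min_cost_to_make_uniform(1, 5, 2, [1, 2]): A returns inf, B returns inf; on min_cost_to_make_uniform(3, 5, 2, [1]): A raises IndexError, B raises IndexError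
import Mathlib
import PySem

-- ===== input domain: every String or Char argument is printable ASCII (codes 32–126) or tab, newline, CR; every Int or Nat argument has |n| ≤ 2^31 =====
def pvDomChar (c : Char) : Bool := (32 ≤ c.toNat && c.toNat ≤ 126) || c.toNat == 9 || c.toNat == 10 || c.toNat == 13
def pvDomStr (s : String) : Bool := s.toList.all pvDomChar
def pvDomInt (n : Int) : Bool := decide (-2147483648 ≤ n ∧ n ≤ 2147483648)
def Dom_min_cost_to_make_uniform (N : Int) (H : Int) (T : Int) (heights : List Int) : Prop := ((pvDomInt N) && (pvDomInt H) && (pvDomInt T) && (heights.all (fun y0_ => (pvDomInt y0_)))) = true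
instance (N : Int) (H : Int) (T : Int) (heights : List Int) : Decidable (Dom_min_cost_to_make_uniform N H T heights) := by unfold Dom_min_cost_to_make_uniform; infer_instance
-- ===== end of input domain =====

-- B replaces A's per-window re-summation by one incremental sliding-window pass over a precomputed cost array (alternative algorithm).

-- ===== PORT A =====
-- literal transliteration of A; min_cost starts at float('inf'), modelled as `none`
-- (Pre_ guarantees at least one outer iteration, so the `.getD 0` default is never the result inside Pre_)
def min_cost_to_make_uniform (N : Int) (H : Int) (T : Int) (heights : List Int) : Int :=
  ((PySem.List.pyRange 0 (N - T + 1) 1).foldl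
    (fun (min_cost : Option Int) i =>
      let current_cost := (PySem.List.pyRange i (i + T) 1).foldl
        (fun c j => c + |PySem.List.pyGetD heights j 0 - H|) 0
      match min_cost with
      | none => some current_cost
      | some m => some (min m current_cost)) none).getD 0

-- ===== PORT B =====
def min_cost_to_make_uniform_alt (N : Int) (H : Int) (T : Int) (heights : List Int) : Int :=
  if N < T then 0 else  -- Source B returns float('inf') here (no window fits); unrepresentable as Int, outside Pre_
  if T ≤ 0 then 0 else  -- a window of non-positive size covers nothing, so it costs nothing
  let costs := (PySem.List.slice heights none (some N)).map (fun h => |h - H|)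
  let window := (PySem.List.slice costs none (some T)).sum
  ((PySem.List.pyRange T N 1).foldl
      (fun (p : Int × Int) i =>
        let w := p.2 + PySem.List.pyGetD costs i 0 - PySem.List.pyGetD costs (i - T) 0
        (if w < p.1 then w else p.1, w)) (window, window)).1

-- ===== PRECONDITION & SPEC =====
-- Pre_ excludes: T > N (A returns float('inf'), not an int) and, for positive T,
-- N > len(heights) (A raises IndexError). Degenerate window sizes T ≤ 0 (where A never
-- touches heights and returns 0) stay inside.
def Pre_min_cost_to_make_uniform (N : Int) (H : Int) (T : Int) (heights : List Int) : Prop :=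
  T ≤ N ∧ (1 ≤ T → N ≤ (heights.length : Int))
instance (N : Int) (H : Int) (T : Int) (heights : List Int) : Decidable (Pre_min_cost_to_make_uniform N H T heights) := by unfold Pre_min_cost_to_make_uniform; infer_instance

def pvWitness_min_cost_to_make_uniform : Int × Int × Int × List Int := (3, 5, 2, [1, 6, 4])

def Spec_min_cost_to_make_uniform (N : Int) (H : Int) (T : Int) (heights : List Int) (out : Int) : Prop := out = min_cost_to_make_uniform_alt N H T heights
instance (N : Int) (H : Int) (T : Int) (heights : List Int) (out : Int) : Decidable (Spec_min_cost_to_make_uniform N H T heights out) := by unfold Spec_min_cost_to_make_uniform; infer_instance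

-- ===== CLAIM (what is proved, stated in full; the proofs are below) =====
def Claim_equal_min_cost_to_make_uniform : Prop := ∀ (N : Int) (H : Int) (T : Int) (heights : List Int), Dom_min_cost_to_make_uniform N H T heights → Pre_min_cost_to_make_uniform N H T heights → Spec_min_cost_to_make_uniform N H T heights (min_cost_to_make_uniform N H T heights)

-- ===== LEMMAS AND PROOFS =====

-- cost of levelling position j to height H
def pvCost (H : Int) (hs : List Int) (j : Int) : Int := |PySem.List.pyGetD hs j 0 - H|

-- cost of the window [i, i+T)
def pvS (H : Int) (hs : List Int) (T : Int) (i : Int) : Int :=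
  (PySem.List.pyRange i (i + T) 1).foldl (fun c j => c + pvCost H hs j) 0

-- running minimum of pvS over a, a+1, …, a+n-1 folded onto m
def pvFoldMin (H : Int) (hs : List Int) (T : Int) (m : Int) (n : Nat) (a : Int) : Int :=
  match n with
  | 0 => m
  | n+1 => pvFoldMin H hs T (min m (pvS H hs T a)) n (a + 1)

theorem pv_foldl_add_shift (g : Int → Int) (l : List Int) (a : Int) :
    l.foldl (fun c j => c + g j) a = a + l.foldl (fun c j => c + g j) 0 := by
  induction l generalizing a with
  | nil => simp
  | cons x xs ih => simp only [List.foldl_cons]; rw [ih, ih (0 + g x)]; ring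

-- sliding-window step: S (k+1) = S k + cost (k+T) - cost k
theorem pvS_step (H : Int) (hs : List Int) (T : Int) (hT : 1 ≤ T) (k : Int) :
    pvS H hs T (k + 1) = pvS H hs T k + pvCost H hs (k + T) - pvCost H hs k := by
  have h1 : PySem.List.pyRange k (k + T) 1 = k :: PySem.List.pyRange (k + 1) (k + T) 1 :=
    PySem.List.pyRange_one_cons (by omega)
  have h2 : PySem.List.pyRange (k + 1) (k + 1 + T) 1
      = PySem.List.pyRange (k + 1) (k + T) 1 ++ [k + T] := by
    have : k + 1 + T = (k + T) + 1 := by ring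
    rw [this, PySem.List.pyRange_one_succ_right (by omega)]
  have hsplit := pv_foldl_add_shift (pvCost H hs)
  unfold pvS
  rw [h1, h2, List.foldl_cons, List.foldl_append,
    hsplit (PySem.List.pyRange (k + 1) (k + T) 1) (0 + pvCost H hs k)]
  simp only [List.foldl_cons, List.foldl_nil]
  ring

-- A's outer loop, once the accumulator is `some m`
theorem pv_foldA (H : Int) (hs : List Int) (T : Int) (n : Nat) :
    ∀ (a m : Int),
    (PySem.List.pyRange a (a + n) 1).foldl
      (fun (min_cost : Option Int) i =>
        let current_cost := (PySem.List.pyRange i (i + T) 1).foldl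
          (fun c j => c + |PySem.List.pyGetD hs j 0 - H|) 0
        match min_cost with
        | none => some current_cost
        | some m => some (min m current_cost)) (some m)
      = some (pvFoldMin H hs T m n a) := by
  induction n with
  | zero =>
    intro a m
    rw [show a + ((0 : Nat) : Int) = a by omega, PySem.List.pyRange_one_eq_nil le_rfl]
    rfl
  | succ n ih =>
    intro a m
    rw [show a + ((n + 1 : Nat) : Int) = (a + 1) + (n : Int) by push_cast; ring,
      PySem.List.pyRange_one_cons (by omega), List.foldl_cons]
    simpa [pvFoldMin, pvS, pvCost] using ih (a + 1) (min m (pvS H hs T a))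

-- B's loop: invariant — snd is the cost of the window ending before i, fst the running min
theorem pv_foldB (H : Int) (hs : List Int) (T : Int) (hT : 1 ≤ T) (n : Nat) :
    ∀ (a m : Int),
    (PySem.List.pyRange a (a + n) 1).foldl
      (fun (p : Int × Int) i =>
        let w := p.2 + |PySem.List.pyGetD hs i 0 - H| - |PySem.List.pyGetD hs (i - T) 0 - H|
        (if w < p.1 then w else p.1, w)) (m, pvS H hs T (a - T))
      = (pvFoldMin H hs T m n (a - T + 1), pvS H hs T (a - T + n)) := by
  induction n with
  | zero =>
    intro a m
    rw [show a + ((0 : Nat) : Int) = a by omega, PySem.List.pyRange_one_eq_nil le_rfl]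
    simp [pvFoldMin]
  | succ n ih =>
    intro a m
    rw [show a + ((n + 1 : Nat) : Int) = (a + 1) + (n : Int) by push_cast; ring,
      PySem.List.pyRange_one_cons (by omega), List.foldl_cons]
    have hw : pvS H hs T (a - T) + |PySem.List.pyGetD hs a 0 - H| - |PySem.List.pyGetD hs (a - T) 0 - H|
        = pvS H hs T (a - T + 1) := by
      have := pvS_step H hs T hT (a - T)
      simp only [pvCost] at this
      rw [this, show a - T + T = a by ring]
    have hmin : (if pvS H hs T (a - T + 1) < m then pvS H hs T (a - T + 1) else m)
        = min m (pvS H hs T (a - T + 1)) := by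
      rcases le_or_gt m (pvS H hs T (a - T + 1)) with h | h
      · rw [min_eq_left h, if_neg (by omega)]
      · rw [min_eq_right (le_of_lt h), if_pos h]
    simp only [hw, hmin]
    have := ih (a + 1) (min m (pvS H hs T (a - T + 1)))
    rw [show a + 1 - T = a - T + 1 by ring] at this
    rw [this]
    simp only [Prod.mk.injEq]
    refine ⟨by simp [pvFoldMin], ?_⟩
    congr 1; push_cast; ring

-- A's whole computation, under 1 ≤ T and N = T + n
theorem pv_A_eq (H T : Int) (hs : List Int) (n : Nat) (N : Int) (hN : N = T + (n : Int)) :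
    min_cost_to_make_uniform N H T hs = pvFoldMin H hs T (pvS H hs T 0) n 1 := by
  unfold min_cost_to_make_uniform
  rw [show N - T + 1 = 1 + (n : Int) by omega,
    PySem.List.pyRange_one_cons (by omega), List.foldl_cons,
    show (0 : Int) + 1 = 1 by ring]
  show (List.foldl
      (fun (min_cost : Option Int) i =>
        let current_cost := (PySem.List.pyRange i (i + T) 1).foldl
          (fun c j => c + |PySem.List.pyGetD hs j 0 - H|) 0
        match min_cost with
        | none => some current_cost
        | some m => some (min m current_cost))
      (some (pvS H hs T 0)) (PySem.List.pyRange 1 (1 + (n : Int)) 1)).getD 0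
    = pvFoldMin H hs T (pvS H hs T 0) n 1
  rw [pv_foldA H hs T n 1 (pvS H hs T 0), Option.getD_some]

-- B's whole computation, under 1 ≤ T ≤ N ≤ len and N = T + n
theorem pv_B_costs (H : Int) (hs : List Int) (N : Int) (hlen : N ≤ (hs.length : Int))
    (i : Int) (h0 : 0 ≤ i) (hiN : i < N) :
    PySem.List.pyGetD ((hs.take N.toNat).map (fun h => |h - H|)) i 0 = pvCost H hs i := by
  have hi : i.toNat < ((hs.take N.toNat).map (fun h => |h - H|)).length := by
    simp only [List.length_map, List.length_take]
    omega
  have hi' : i.toNat < hs.length := by omega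
  rw [PySem.List.pyGetD_eq_getElem ((hs.take N.toNat).map (fun h => |h - H|)) 0 h0
      (by simp only [List.length_map, List.length_take]; omega),
    List.getElem_map, List.getElem_take]
  unfold pvCost
  rw [PySem.List.pyGetD_eq_getElem hs 0 h0 (by omega)]

theorem pv_B_sum (H : Int) (hs : List Int) (N : Int) (hlen : N ≤ (hs.length : Int)) (k : Nat)
    (hk : (k : Int) ≤ N) :
    (((hs.take N.toNat).map (fun h => |h - H|)).take k).sum
      = (PySem.List.pyRange 0 (k : Int) 1).foldl (fun c j => c + pvCost H hs j) 0 := by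
  induction k with
  | zero =>
    rw [Nat.cast_zero, PySem.List.pyRange_one_eq_nil le_rfl]
    simp
  | succ k ih =>
    have hk' : (k : Int) ≤ N := by push_cast at hk ⊢; omega
    have hlt : k < ((hs.take N.toNat).map (fun h => |h - H|)).length := by
      simp only [List.length_map, List.length_take]; omega
    have hval : ((hs.take N.toNat).map (fun h => |h - H|))[k] = pvCost H hs (k : Int) := by
      have := pv_B_costs H hs N hlen (k : Int) (by omega) (by omega)
      rw [PySem.List.pyGetD_eq_getElem ((hs.take N.toNat).map (fun h => |h - H|)) 0 (by omega)
        (by simp only [List.length_map, List.length_take]; omega)] at this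
      simpa using this
    rw [show ((k + 1 : Nat) : Int) = (k : Int) + 1 by push_cast; ring,
      PySem.List.pyRange_one_succ_right (by omega), List.foldl_append, ← ih hk',
      List.take_add_one, List.getElem?_eq_getElem hlt, hval]
    simp

theorem pv_B_eq (H T : Int) (hs : List Int) (hT : 1 ≤ T) (n : Nat) (N : Int)
    (hN : N = T + (n : Int)) (hlen : N ≤ (hs.length : Int)) :
    min_cost_to_make_uniform_alt N H T hs = pvFoldMin H hs T (pvS H hs T 0) n 1 := by
  simp only [min_cost_to_make_uniform_alt]
  rw [if_neg (by omega : ¬ N < T), if_neg (by omega : ¬ T ≤ 0),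
    PySem.List.slice_to hs (by omega : (0 : Int) ≤ N),
    PySem.List.slice_to _ (by omega : (0 : Int) ≤ T)]
  have hW : (((hs.take N.toNat).map (fun h => |h - H|)).take T.toNat).sum = pvS H hs T 0 := by
    rw [pv_B_sum H hs N hlen T.toNat (by omega), show ((T.toNat : Int)) = T by omega]
    unfold pvS
    rw [zero_add]
  rw [hW]
  have hfold := PySem.List.foldl_congr_mem
    (l := PySem.List.pyRange T N 1) (init := (pvS H hs T 0, pvS H hs T 0))
    (f := fun (p : Int × Int) i =>
      let w := p.2 + PySem.List.pyGetD ((hs.take N.toNat).map (fun h => |h - H|)) i 0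
        - PySem.List.pyGetD ((hs.take N.toNat).map (fun h => |h - H|)) (i - T) 0
      (if w < p.1 then w else p.1, w))
    (g := fun (p : Int × Int) i =>
      let w := p.2 + |PySem.List.pyGetD hs i 0 - H| - |PySem.List.pyGetD hs (i - T) 0 - H|
      (if w < p.1 then w else p.1, w))
    (by
      intro acc x hx
      obtain ⟨hx1, hx2⟩ := PySem.List.mem_pyRange_one.mp hx
      simp only []
      rw [pv_B_costs H hs N hlen x (by omega) (by omega),
        pv_B_costs H hs N hlen (x - T) (by omega) (by omega)]
      rfl)
  rw [hfold, show pvS H hs T 0 = pvS H hs T (T - T) by rw [sub_self], hN,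
    pv_foldB H hs T hT n T (pvS H hs T (T - T)),
    show T - T + 1 = (1 : Int) by ring]

-- degenerate window size: every window cost is 0
theorem pvS_nil (H : Int) (hs : List Int) (T : Int) (hT : T ≤ 0) (a : Int) :
    pvS H hs T a = 0 := by
  unfold pvS
  rw [PySem.List.pyRange_one_eq_nil (by omega)]
  rfl

theorem pvFoldMin_zero (H : Int) (hs : List Int) (T : Int) (hT : T ≤ 0) (n : Nat) :
    ∀ (a : Int), pvFoldMin H hs T 0 n a = 0 := by
  induction n with
  | zero => intro a; rfl
  | succ n ih =>
    intro a
    show pvFoldMin H hs T (min 0 (pvS H hs T a)) n (a + 1) = 0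
    rw [pvS_nil H hs T hT a, min_self]
    exact ih (a + 1)

-- ===== VERDICT (by name: the statement is the Claim_ definition above) =====
theorem min_cost_to_make_uniform_spec : Claim_equal_min_cost_to_make_uniform := by
  intro N H T heights _ hPre
  obtain ⟨hTN, hlen⟩ := hPre
  have hN : N = T + ((N - T).toNat : Int) := by omega
  unfold Spec_min_cost_to_make_uniform
  by_cases hT : 1 ≤ T
  · rw [pv_A_eq H T heights _ N hN, pv_B_eq H T heights hT _ N hN (hlen hT)]
  · unfold min_cost_to_make_uniform_alt
    rw [if_neg (by omega : ¬ N < T), if_pos (by omega : T ≤ 0), pv_A_eq H T heights _ N hN,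
      pvS_nil H heights T (by omega) 0, pvFoldMin_zero H heights T (by omega) _ 1]
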